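-- pv_equiv track=rewrite | github.com/elazarcoh/m4b-tools | src/m4b_tools/combiner.py | check_audio_compatibility
-- ===== SOURCE A (Python) =====
-- from typing import List, Dict, Optional, Tuple
--
-- def check_audio_compatibility(files_metadata: List[Dict]) -> bool:
--     """Check if all files have compatible audio parameters."""
--     if not files_metadata:
--         return False
--
--     first_file = files_metadata[0]
--     reference_codec = first_file.get('codec')
--     reference_sample_rate = first_file.get('sample_rate')
--     reference_channels = first_file.get('channels')
--
--     for metadata in files_metadata[1:]:
--         if (metadata.get('codec') != reference_codec or
--             metadata.get('sample_rate') != reference_sample_rate or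
--             metadata.get('channels') != reference_channels):
--             return False
--
--     return True
-- ===== SOURCE B (Python) =====
-- from typing import List, Dict
--
-- def check_audio_compatibility(files_metadata: List[Dict]) -> bool:
--     """Check if all files have compatible audio parameters."""
--     if not files_metadata:
--         return False
--     return len({(m.get('codec'), m.get('sample_rate'), m.get('channels'))
--                 for m in files_metadata}) == 1
-- ===== Notes on version B (the rewrite author's own statement) =====
-- stated objective: idiomatic
-- what changed: Replaces the reference-triple-plus-early-return mismatch scan with building the set of distinct (codec, sample_rate, channels) triples and checking it has exactly one element.
import Mathlib
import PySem

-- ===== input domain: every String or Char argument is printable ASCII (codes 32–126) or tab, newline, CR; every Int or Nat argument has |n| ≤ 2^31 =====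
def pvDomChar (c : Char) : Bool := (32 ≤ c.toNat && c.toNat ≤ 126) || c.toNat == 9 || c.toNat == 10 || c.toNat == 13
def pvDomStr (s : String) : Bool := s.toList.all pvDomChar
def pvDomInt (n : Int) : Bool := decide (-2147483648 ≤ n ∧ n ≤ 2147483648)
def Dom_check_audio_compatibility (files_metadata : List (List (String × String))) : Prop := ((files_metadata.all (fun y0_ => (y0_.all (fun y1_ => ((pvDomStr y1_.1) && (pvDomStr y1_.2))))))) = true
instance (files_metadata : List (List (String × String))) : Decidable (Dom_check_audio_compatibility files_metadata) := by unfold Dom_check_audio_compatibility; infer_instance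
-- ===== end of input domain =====

-- B replaces A's reference-triple + early-return mismatch scan by deduplicating the
-- parameter triples into a set and checking it has exactly one element (idiomatic).

-- shared helper: Python's dict.get(k) on an association list (first match)
def dget (m : List (String × String)) (k : String) : Option String :=
  (PySem.Dict.mk m).get? k

-- ===== PORT A =====
def checkLoopA (rc rs rch : Option String) : List (List (String × String)) → Bool
  | [] => true
  | m :: ms =>
    if dget m "codec" != rc || dget m "sample_rate" != rs || dget m "channels" != rch then
      false
    else
      checkLoopA rc rs rch ms

def check_audio_compatibility (files_metadata : List (List (String × String))) : Bool :=
  match files_metadata with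
  | [] => false
  | first_file :: rest =>
    checkLoopA (dget first_file "codec") (dget first_file "sample_rate")
      (dget first_file "channels") rest

-- ===== PORT B =====
def paramTriple (m : List (String × String)) : Option String × Option String × Option String :=
  (dget m "codec", dget m "sample_rate", dget m "channels")

def check_audio_compatibility_alt (files_metadata : List (List (String × String))) : Bool :=
  match files_metadata with
  | [] => false
  | _ :: _ =>
    PySem.Set.len (PySem.Set.ofList (files_metadata.map paramTriple)) == 1

-- ===== PRECONDITION & SPEC =====
def Spec_check_audio_compatibility (files_metadata : List (List (String × String))) (out : Bool) : Prop := out = check_audio_compatibility_alt files_metadata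
instance (files_metadata : List (List (String × String))) (out : Bool) : Decidable (Spec_check_audio_compatibility files_metadata out) := by unfold Spec_check_audio_compatibility; infer_instance

-- ===== CLAIM (what is proved, stated in full; the proofs are below) =====
def Claim_equal_check_audio_compatibility : Prop := ∀ (files_metadata : List (List (String × String))), Dom_check_audio_compatibility files_metadata → Spec_check_audio_compatibility files_metadata (check_audio_compatibility files_metadata)

-- ===== LEMMAS AND PROOFS =====

-- A's loop returns true iff every remaining file matches the reference triple
theorem checkLoopA_eq_all (rc rs rch : Option String) (ms : List (List (String × String))) :
    checkLoopA rc rs rch ms =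
      ms.all (fun m => paramTriple m == (rc, rs, rch)) := by
  induction ms with
  | nil => rfl
  | cons m ms ih =>
    simp only [checkLoopA, List.all_cons, ih, paramTriple]
    by_cases h1 : dget m "codec" = rc <;>
      by_cases h2 : dget m "sample_rate" = rs <;>
        by_cases h3 : dget m "channels" = rch <;>
          simp [h1, h2, h3, Prod.ext_iff, bne]

-- a nodup list containing t whose elements all equal t is [t]
theorem nodup_all_eq {α : Type} (t : α) (s : List α) (hn : s.Nodup) (ht : t ∈ s)
    (hall : ∀ x ∈ s, x = t) : s = [t] := by
  match s with
  | [] => cases ht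
  | [a] => simp_all
  | a :: b :: s =>
    have ha := hall a (by simp)
    have hb := hall b (by simp)
    subst ha; rw [hb] at hn; simp at hn

-- the deduplicated set of (t :: l) is a singleton iff every element of l equals t
theorem setlen_one_iff {α : Type} [DecidableEq α] [BEq α] [LawfulBEq α]
    (t : α) (l : List α) :
    (PySem.Set.len (PySem.Set.ofList (t :: l)) == (1 : Int)) =
      l.all (fun x => x == t) := by
  by_cases h : ∀ x ∈ l, x = t
  · have hs : PySem.Set.ofList (t :: l) = [t] := by
      apply nodup_all_eq t _ (PySem.Set.nodup_ofList _)
      · rw [PySem.Set.mem_ofList]; simp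
      · intro x hx
        rw [PySem.Set.mem_ofList, List.mem_cons] at hx
        cases hx with
        | inl h1 => exact h1
        | inr h2 => exact h x h2
    rw [hs]
    have hall : l.all (fun x => x == t) = true := by
      rw [List.all_eq_true]; intro x hx; simpa using h x hx
    rw [hall]
    rfl
  · push Not at h
    obtain ⟨x, hxl, hxt⟩ := h
    have hmem_t : t ∈ PySem.Set.ofList (t :: l) := by
      rw [PySem.Set.mem_ofList]; simp
    have hmem_x : x ∈ PySem.Set.ofList (t :: l) := by
      rw [PySem.Set.mem_ofList]; simp [hxl]
    have hlen : (PySem.Set.len (PySem.Set.ofList (t :: l)) == (1 : Int)) = false := by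
      rw [beq_eq_false_iff_ne]
      intro hc
      unfold PySem.Set.len at hc
      have h1 : (PySem.Set.ofList (t :: l)).length = 1 := by omega
      rw [List.length_eq_one_iff] at h1
      obtain ⟨a, ha⟩ := h1
      rw [ha] at hmem_t hmem_x
      simp at hmem_t hmem_x
      exact hxt (hmem_x.trans hmem_t.symm)
    have hall : l.all (fun x => x == t) = false := by
      rw [List.all_eq_false]
      exact ⟨x, hxl, by simpa using hxt⟩
    rw [hlen, hall]

-- ===== VERDICT (by name: the statement is the Claim_ definition above) =====
theorem check_audio_compatibility_spec : Claim_equal_check_audio_compatibility := by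
  intro fm _
  unfold Spec_check_audio_compatibility
  cases fm with
  | nil => rfl
  | cons first rest =>
    simp only [check_audio_compatibility, check_audio_compatibility_alt,
      checkLoopA_eq_all, List.map_cons, setlen_one_iff, List.all_map]
    rfl
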